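-- pv_equiv track=rewrite | github.com/tonyxieuoft/BCB430_Chang_Lab_program | NCBI_Genome_Blaster/assemble_blast_result_sequences.py | gap_corrector
-- ===== SOURCE A (Python) =====
-- def gap_corrector(q_seq, h_seq):
--
--     q_seq_gaps = 0
--     q_no_gaps = ""
--     for ch in q_seq:
--         if ch == "-":
--             q_seq_gaps += 1
--         else:
--             q_no_gaps += ch
--
--     q_gaps_counter = q_seq_gaps
--     h_seq_gaps = 0
--     h_corrected_gaps = ""
--     for ch in h_seq:
--         if ch == "-":
--             h_seq_gaps += 1
--             q_gaps_counter -= 1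
--         if ch != "-" or q_gaps_counter < 0:
--             h_corrected_gaps += ch
--
--     return h_corrected_gaps
-- ===== SOURCE B (Python) =====
-- def gap_corrector(q_seq, h_seq):
--     k = q_seq.count("-")
--     dash_positions = [i for i, ch in enumerate(h_seq) if ch == "-"]
--     drop = set(dash_positions[:k])
--     return "".join(ch for i, ch in enumerate(h_seq) if i not in drop)
-- ===== Notes on version B (the rewrite author's own statement) =====
-- stated objective: alternative
-- what changed: Replaces A's single decrementing-counter sweep (and its unused gap-stripped query accumulator) with an index table: count the query's dashes, list the homolog's dash positions, mark the first k for deletion, and rebuild by filtering indices.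
import Mathlib
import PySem

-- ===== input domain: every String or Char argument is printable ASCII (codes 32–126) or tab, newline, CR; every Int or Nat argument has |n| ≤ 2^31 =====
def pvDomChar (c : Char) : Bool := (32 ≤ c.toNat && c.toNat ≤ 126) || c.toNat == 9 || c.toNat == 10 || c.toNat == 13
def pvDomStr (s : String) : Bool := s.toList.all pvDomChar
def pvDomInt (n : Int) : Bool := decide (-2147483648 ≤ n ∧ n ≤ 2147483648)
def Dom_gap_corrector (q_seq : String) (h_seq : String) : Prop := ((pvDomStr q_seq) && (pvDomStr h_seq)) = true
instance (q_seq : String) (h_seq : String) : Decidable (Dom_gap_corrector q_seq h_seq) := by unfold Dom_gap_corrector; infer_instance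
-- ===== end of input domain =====

-- B replaces A's decrementing-counter sweep with an index table of the homolog's dash
-- positions, dropping the first k of them (objective: alternative; same asymptotic cost).

-- ===== PORT A =====
-- first loop: counts gaps in q_seq and builds the (unused) gap-free query
-- second loop: state (h_seq_gaps, q_gaps_counter, h_corrected_gaps)
def gap_corrector (q_seq : String) (h_seq : String) : String :=
  let s1 : Int × List Char :=
    q_seq.toList.foldl
      (fun st ch => if ch = '-' then (st.1 + 1, st.2) else (st.1, st.2 ++ [ch]))
      (0, [])
  let s2 : Int × Int × List Char :=
    h_seq.toList.foldl
      (fun st ch =>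
        let hg := if ch = '-' then st.1 + 1 else st.1
        let c := if ch = '-' then st.2.1 - 1 else st.2.1
        if ch ≠ '-' ∨ c < 0 then (hg, c, st.2.2 ++ [ch]) else (hg, c, st.2.2))
      (0, s1.1, [])
  String.mk s2.2.2

-- ===== PORT B =====
def gap_corrector_alt (q_seq : String) (h_seq : String) : String :=
  let k := q_seq.toList.count '-'
  let dashPositions := ((h_seq.toList.zipIdx).filter (fun p => p.1 = '-')).map (fun p => p.2)
  let drop := PySem.Set.ofList (dashPositions.take k)
  String.mk ((h_seq.toList.zipIdx).filterMap (fun (p : Char × Nat) => if p.2 ∈ drop then none else some p.1))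

-- ===== PRECONDITION & SPEC =====
def Spec_gap_corrector (q_seq : String) (h_seq : String) (out : String) : Prop := out = gap_corrector_alt q_seq h_seq
instance (q_seq : String) (h_seq : String) (out : String) : Decidable (Spec_gap_corrector q_seq h_seq out) := by unfold Spec_gap_corrector; infer_instance

-- ===== CLAIM (what is proved, stated in full; the proofs are below) =====
def Claim_equal_gap_corrector : Prop := ∀ (q_seq : String) (h_seq : String), Dom_gap_corrector q_seq h_seq → Spec_gap_corrector q_seq h_seq (gap_corrector q_seq h_seq)

-- ===== LEMMAS AND PROOFS =====

-- reference function: remove the first k dashes of a list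
def rmN (k : Nat) : List Char → List Char
  | [] => []
  | ch :: t => if ch = '-' then (if k = 0 then ch :: rmN 0 t else rmN (k - 1) t)
               else ch :: rmN k t

theorem rmN_zero (l : List Char) : rmN 0 l = l := by
  induction l with
  | nil => rfl
  | cons ch t ih => by_cases h : ch = '-' <;> simp [rmN, h, ih]

-- A's second loop as a recursion over the list with an Int counter
def rmA (c : Int) : List Char → List Char
  | [] => []
  | ch :: t => if ch = '-' then (if c - 1 < 0 then ch :: rmA (c - 1) t else rmA (c - 1) t)
               else ch :: rmA c t

theorem foldl_q_count (l : List Char) (st : Int × List Char) :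
    (l.foldl (fun st ch => if ch = '-' then (st.1 + 1, st.2) else (st.1, st.2 ++ [ch])) st).1
      = st.1 + (l.count '-' : Int) := by
  induction l generalizing st with
  | nil => simp
  | cons ch t ih =>
    by_cases h : ch = '-' <;>
      simp [List.foldl_cons, h, ih]; omega

theorem foldl_h_rmA (l : List Char) (hg c : Int) (acc : List Char) :
    (l.foldl
      (fun (st : Int × Int × List Char) ch =>
        let hg := if ch = '-' then st.1 + 1 else st.1
        let c := if ch = '-' then st.2.1 - 1 else st.2.1
        if ch ≠ '-' ∨ c < 0 then (hg, c, st.2.2 ++ [ch]) else (hg, c, st.2.2))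
      (hg, c, acc)).2.2 = acc ++ rmA c l := by
  induction l generalizing hg c acc with
  | nil => simp [rmA]
  | cons ch t ih =>
    by_cases h : ch = '-'
    · by_cases hc : c - 1 < 0 <;> simp [List.foldl_cons, h, hc, ih, rmA]
    · simp [List.foldl_cons, h, ih, rmA]

theorem rmA_eq_rmN (l : List Char) (c : Int) : rmA c l = rmN c.toNat l := by
  induction l generalizing c with
  | nil => rfl
  | cons ch t ih =>
    by_cases h : ch = '-'
    · by_cases hc : c - 1 < 0
      · have h0 : c.toNat = 0 := by omega
        have h1 : (c - 1).toNat = 0 := by omega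
        simp [rmA, rmN, h, hc, h0, h1, ih, rmN_zero]
      · have h0 : c.toNat ≠ 0 := by omega
        have h1 : (c - 1).toNat = c.toNat - 1 := by omega
        simp [rmA, rmN, h, hc, h0, ih, h1]
    · simp [rmA, rmN, h, ih]

-- B side: the dash-position table
def ds (n : Nat) (l : List Char) : List Nat :=
  ((l.zipIdx n).filter (fun p => p.1 = '-')).map (fun p => p.2)

theorem ds_cons (n : Nat) (ch : Char) (t : List Char) :
    ds n (ch :: t) = if ch = '-' then n :: ds (n + 1) t else ds (n + 1) t := by
  by_cases h : ch = '-' <;> simp [ds, List.zipIdx_cons, h]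

theorem ds_ge (l : List Char) (n m : Nat) (hm : m ∈ ds n l) : n ≤ m := by
  induction l generalizing n with
  | nil => simp [ds] at hm
  | cons ch t ih =>
    rw [ds_cons] at hm
    by_cases h : ch = '-'
    · simp [h] at hm
      rcases hm with h1 | h1
      · omega
      · have := ih (n + 1) h1; omega
    · simp [h] at hm
      have := ih (n + 1) hm; omega

theorem filterMap_drop (l : List Char) (n k : Nat) :
    (l.zipIdx n).filterMap
        (fun p => if p.2 ∈ PySem.Set.ofList ((ds n l).take k) then none else some p.1)
      = rmN k l := by
  induction l generalizing n k with
  | nil => simp [rmN]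
  | cons ch t ih =>
    rw [List.zipIdx_cons, List.filterMap_cons]
    by_cases h : ch = '-'
    · rw [ds_cons, if_pos h]
      cases k with
      | zero =>
        simp only [List.take_zero]
        have hmem : ¬ (n ∈ PySem.Set.ofList ([] : List Nat)) := by
          simp [PySem.Set.ofList]
        rw [if_neg hmem, rmN, if_pos h, if_pos rfl]
        exact congrArg (ch :: ·) (ih (n + 1) 0)
      | succ k' =>
        rw [List.take_succ_cons]
        have hmem : n ∈ PySem.Set.ofList (n :: (ds (n + 1) t).take k') := by
          simp [PySem.Set.mem_ofList]
        rw [if_pos hmem]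
        have hcongr : (t.zipIdx (n + 1)).filterMap
            (fun p => if p.2 ∈ PySem.Set.ofList (n :: (ds (n + 1) t).take k') then none else some p.1)
          = (t.zipIdx (n + 1)).filterMap
            (fun p => if p.2 ∈ PySem.Set.ofList ((ds (n + 1) t).take k') then none else some p.1) := by
          apply List.filterMap_congr
          intro p hp
          have hge : n + 1 ≤ p.2 := by
            rcases List.mem_zipIdx hp with ⟨h1, _⟩
            omega
          by_cases hin : p.2 ∈ PySem.Set.ofList ((ds (n + 1) t).take k')
          · rw [if_pos hin, if_pos]
            simp only [PySem.Set.mem_ofList] at hin ⊢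
            exact List.mem_cons_of_mem _ hin
          · rw [if_neg hin, if_neg]
            simp only [PySem.Set.mem_ofList] at hin ⊢
            intro hmem2
            rcases List.mem_cons.mp hmem2 with h1 | h1
            · omega
            · exact hin h1
        rw [hcongr, ih (n + 1) k', rmN, if_pos h, if_neg (by omega)]
        simp
    · rw [ds_cons, if_neg h]
      have hnot : ¬ n ∈ PySem.Set.ofList ((ds (n + 1) t).take k) := by
        simp only [PySem.Set.mem_ofList]
        intro hmem
        have h1 : n ∈ ds (n + 1) t := List.mem_of_mem_take hmem
        have := ds_ge t (n + 1) n h1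
        omega
      rw [if_neg hnot, rmN, if_neg h]
      exact congrArg (ch :: ·) (ih (n + 1) k)

-- ===== VERDICT (by name: the statement is the Claim_ definition above) =====
theorem gap_corrector_spec : Claim_equal_gap_corrector := by
  intro q h _
  unfold Spec_gap_corrector gap_corrector gap_corrector_alt
  simp only
  rw [foldl_h_rmA, List.nil_append, rmA_eq_rmN, foldl_q_count]
  have hk : ((0 : Int) + (q.toList.count '-' : Int)).toNat = q.toList.count '-' := by omega
  rw [hk]
  have hfm := filterMap_drop h.toList 0 (q.toList.count '-')
  simp only [ds] at hfm
  exact congrArg String.mk hfm.symm
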